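-- pv_equiv track=rewrite | github.com/MMA2004/ADA | Tarea2/ingredients.py | dp
-- ===== SOURCE A (Python) =====
-- def dp(costos, prestigios, n, presupuesto, memo):
--     if (n, presupuesto) in memo:
--         ans = memo[(n, presupuesto)]
--     else:
--         if n == len(costos):
--             ans = (0, 0)
--         elif costos[n] > presupuesto:
--             ans = dp(costos, prestigios, n+1, presupuesto, memo)
--         else:
--             # opción 1: no tomar plato
--             p1, c1 = dp(costos, prestigios, n + 1, presupuesto, memo)
--
--             # opción 2: tomar plato
--             p2, c2 = dp(costos, prestigios, n + 1, presupuesto - costos[n], memo)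
--             p2 += prestigios[n]
--             c2 += costos[n]
--
--             # comparar
--             if p2 > p1:
--                 ans = (p2, c2)
--             elif p2 < p1:
--                 ans = (p1, c1)
--             else:
--                 ans = (p2, min(c1, c2))
--
--     memo[(n, presupuesto)] = ans
--
--     return ans
-- ===== SOURCE B (Python) =====
-- def dp(costos, prestigios, n, presupuesto, memo):
--     # NOTE: A caches results into `memo` in place; B reads `memo` but does not
--     # write to it — equivalence claimed is about the RETURN value only.
--     total = len(costos)
--
--     # Phase 1: walk forward level by level, collecting at each level i the
--     # distinct budgets whose value must be computed by the recurrence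
--     # (i.e. not answered directly by the seeded memo or the base case).
--     levels = []
--     i = n
--     cur = [presupuesto]
--     while True:
--         exp = []
--         seen = set()   # the contents of exp, kept as a set for membership tests
--         for b in cur:
--             if b not in seen and (i, b) not in memo and i != total:
--                 seen.add(b)
--                 exp.append(b)
--         levels.append((i, exp))
--         if not exp:
--             break
--         c = costos[i]
--         nxt = []
--         for b in exp:
--             nxt.append(b)
--             if c <= b:
--                 nxt.append(b - c)
--         cur = nxt
--         i += 1
--
--     # Phase 2: fill per-level value tables backwards (deepest level first).
--     def getval(j, b, table):
--         if (j, b) in memo: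
--             return memo[(j, b)]
--         if j == total:
--             return (0, 0)
--         return table[b]
--
--     table = {}
--     for j, exp in reversed(levels):
--         newtab = {}
--         for b in exp:
--             c = costos[j]
--             if c > b:
--                 newtab[b] = getval(j + 1, b, table)
--             else:
--                 p1, c1 = getval(j + 1, b, table)
--                 p2, c2 = getval(j + 1, b - c, table)
--                 p2 += prestigios[j]
--                 c2 += c
--                 if p2 > p1:
--                     newtab[b] = (p2, c2)
--                 elif p2 < p1:
--                     newtab[b] = (p1, c1)
--                 else:
--                     newtab[b] = (p2, min(c1, c2))
--         table = newtab
--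
--     return getval(n, presupuesto, table)
-- ===== Notes on version B (the rewrite author's own statement) =====
-- stated objective: alternative
-- what changed: Replaces A's memoized top-down recursion with an iterative two-phase DP of the same cost: a forward pass collects, level by level, the distinct budgets actually consulted (honoring pre-seeded memo hits), then a backward pass fills per-level value tables with the same recurrence and tie-break; it trades recursion (and A's in-place memo caching) for explicit frontier lists and tables.
-- outside the precondition, e.g. on dp([2], [5], -1, 3, {}): A returns (5, 2), B returns (5, 2); on dp([], [], 5, 0, {(5, 0): (1, 2)}): A returns (1, 2), B returns (1, 2); on dp([7], [], 0, 3, {}): A returns (0, 0), B returns (0, 0)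
import Mathlib
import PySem

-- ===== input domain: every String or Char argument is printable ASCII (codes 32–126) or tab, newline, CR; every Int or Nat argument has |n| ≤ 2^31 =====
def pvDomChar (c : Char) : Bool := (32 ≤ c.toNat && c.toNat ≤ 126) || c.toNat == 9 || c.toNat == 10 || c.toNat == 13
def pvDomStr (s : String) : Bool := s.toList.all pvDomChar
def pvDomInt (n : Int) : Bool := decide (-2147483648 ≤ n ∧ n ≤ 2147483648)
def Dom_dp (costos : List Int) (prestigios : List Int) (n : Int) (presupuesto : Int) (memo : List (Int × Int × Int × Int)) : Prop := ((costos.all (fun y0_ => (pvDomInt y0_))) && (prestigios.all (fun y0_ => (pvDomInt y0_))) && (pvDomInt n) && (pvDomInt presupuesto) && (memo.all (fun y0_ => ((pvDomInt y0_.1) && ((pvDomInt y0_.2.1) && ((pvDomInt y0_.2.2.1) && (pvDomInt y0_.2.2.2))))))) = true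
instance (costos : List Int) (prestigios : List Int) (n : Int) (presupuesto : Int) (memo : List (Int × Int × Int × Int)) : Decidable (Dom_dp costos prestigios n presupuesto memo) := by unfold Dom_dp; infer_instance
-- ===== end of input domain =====

-- B replaces A's memoized top-down recursion by an iterative two-phase frontier DP
-- (forward pass collecting consulted budgets per level, backward per-level tables);
-- A mutates `memo` in place (caches results), B only reads it — the equivalence
-- proved here is about the RETURN value.


-- the Python `memo` dict, marshalled from the association list (later duplicates overwrite)
def pvMemoDict (memo : List (Int × Int × Int × Int)) : PySem.Dict (Int × Int) (Int × Int) :=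
  memo.foldl (fun d e => d.insert (e.1, e.2.1) e.2.2) PySem.Dict.empty

-- ===== PORT A =====
-- the recursion threads the mutable memo dict; fuel bounds the recursion depth
def dpAuxA (costos prestigios : List Int) : Nat → Int → Int → PySem.Dict (Int × Int) (Int × Int) → (Int × Int) × PySem.Dict (Int × Int) (Int × Int)
  | 0, _, _, memo => ((0, 0), memo)  -- fuel exhausted: unreachable under Pre_dp
  | f + 1, nn, b, memo =>
    let res :=
      match memo.get? (nn, b) with
      | some v => (v, memo)
      | none =>
        if nn = (costos.length : Int) then ((0, 0), memo)
        else
          match PySem.List.pyGet? costos nn with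
          | none => ((0, 0), memo)  -- Python raises IndexError here (outside Pre_dp)
          | some c =>
            if c > b then dpAuxA costos prestigios f (nn + 1) b memo
            else
              let r1 := dpAuxA costos prestigios f (nn + 1) b memo
              let r2 := dpAuxA costos prestigios f (nn + 1) (b - c) r1.2
              let p2 := r2.1.1 + (PySem.List.pyGet? prestigios nn).getD 0
              let c2 := r2.1.2 + c
              if p2 > r1.1.1 then ((p2, c2), r2.2)
              else if p2 < r1.1.1 then (r1.1, r2.2)
              else ((p2, min r1.1.2 c2), r2.2)
    (res.1, res.2.insert (nn, b) res.1)

def dp (costos : List Int) (prestigios : List Int) (n : Int) (presupuesto : Int) (memo : List (Int × Int × Int × Int)) : Int × Int :=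
  (dpAuxA costos prestigios (((costos.length : Int) - n).toNat + 1) n presupuesto (pvMemoDict memo)).1

-- ===== PORT B =====
-- phase 1 inner loop: dedup + filter the budgets needing expansion at level i
-- (the Python keeps `seen`, a set holding exactly exp's contents, for
--  membership; it is ported as membership in exp itself — same contents)
def expLevelB (memo0 : PySem.Dict (Int × Int) (Int × Int)) (total : Int) (i : Int) (cur : List Int) : List Int :=
  cur.foldl (fun exp b =>
    if exp.contains b = false ∧ memo0.contains (i, b) = false ∧ i ≠ total then exp ++ [b] else exp) []

-- phase 1: the while-loop; fuel bounds its iterations (it stops at i = len(costos))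
def phase1B (costos : List Int) (memo0 : PySem.Dict (Int × Int) (Int × Int)) : Nat → Int → List Int → List (Int × List Int)
  | 0, _, _ => []  -- fuel exhausted: unreachable under Pre_dp
  | f + 1, i, cur =>
    let exp := expLevelB memo0 (costos.length : Int) i cur
    if exp.isEmpty then [(i, exp)]
    else
      let c := (PySem.List.pyGet? costos i).getD 0  -- Python costos[i]; in range under Pre_dp
      let nxt := exp.foldl (fun acc b => if c ≤ b then acc ++ [b, b - c] else acc ++ [b]) []
      (i, exp) :: phase1B costos memo0 f (i + 1) nxt

def getvalB (memo0 : PySem.Dict (Int × Int) (Int × Int)) (total : Int) (j b : Int) (table : PySem.Dict Int (Int × Int)) : Int × Int :=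
  match memo0.get? (j, b) with
  | some v => v
  | none => if j = total then (0, 0) else table.getD b (0, 0)  -- Python table[b]; key present for every consulted state

-- the value stored into newtab[b] in phase 2
def pvVal (costos prestigios : List Int) (memo0 : PySem.Dict (Int × Int) (Int × Int)) (j : Int) (table : PySem.Dict Int (Int × Int)) (b : Int) : Int × Int :=
  let c := (PySem.List.pyGet? costos j).getD 0
  if c > b then getvalB memo0 (costos.length : Int) (j + 1) b table
  else
    let r1 := getvalB memo0 (costos.length : Int) (j + 1) b table
    let r2 := getvalB memo0 (costos.length : Int) (j + 1) (b - c) table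
    let p2 := r2.1 + (PySem.List.pyGet? prestigios j).getD 0
    let c2 := r2.2 + c
    if p2 > r1.1 then (p2, c2)
    else if p2 < r1.1 then r1
    else (p2, min r1.2 c2)

-- phase 2 body: build the table of one level from the table of the next
def levelTabB (costos prestigios : List Int) (memo0 : PySem.Dict (Int × Int) (Int × Int)) (lvl : Int × List Int) (table : PySem.Dict Int (Int × Int)) : PySem.Dict Int (Int × Int) :=
  lvl.2.foldl (fun newtab b => newtab.insert b (pvVal costos prestigios memo0 lvl.1 table b)) PySem.Dict.empty

def dp_alt (costos : List Int) (prestigios : List Int) (n : Int) (presupuesto : Int) (memo : List (Int × Int × Int × Int)) : Int × Int :=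
  let memo0 := pvMemoDict memo
  let levels := phase1B costos memo0 (((costos.length : Int) - n).toNat + 1) n [presupuesto]
  let table := levels.foldr (levelTabB costos prestigios memo0) PySem.Dict.empty
  getvalB memo0 (costos.length : Int) n presupuesto table

-- ===== PRECONDITION & SPEC =====
-- Pre_dp is the function's natural domain: a valid starting index 0 ≤ n ≤ len(costos)
-- and prestigios at least as long as costos.  Outside it A raises IndexError (or
-- RecursionError) except for accidental returns via Python's negative-index
-- wraparound, a pre-seeded memo hit at an out-of-range state, or a too-short
-- prestigios that happens never to be indexed — accidents of A's implementation
-- (which B happens to reproduce) rather than part of the function's contract.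
def Pre_dp (costos : List Int) (prestigios : List Int) (n : Int) (presupuesto : Int) (memo : List (Int × Int × Int × Int)) : Prop :=
  0 ≤ n ∧ n ≤ (costos.length : Int) ∧ costos.length ≤ prestigios.length
instance (costos : List Int) (prestigios : List Int) (n : Int) (presupuesto : Int) (memo : List (Int × Int × Int × Int)) : Decidable (Pre_dp costos prestigios n presupuesto memo) := by unfold Pre_dp; infer_instance

def pvWitness_dp : List Int × List Int × Int × Int × (List (Int × Int × Int × Int)) :=
  ([3, 2, 4], [5, 1, 6], 0, 6, [(1, 4, 7, 7)])

def Spec_dp (costos : List Int) (prestigios : List Int) (n : Int) (presupuesto : Int) (memo : List (Int × Int × Int × Int)) (out : Int × Int) : Prop := out = dp_alt costos prestigios n presupuesto memo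
instance (costos : List Int) (prestigios : List Int) (n : Int) (presupuesto : Int) (memo : List (Int × Int × Int × Int)) (out : Int × Int) : Decidable (Spec_dp costos prestigios n presupuesto memo out) := by unfold Spec_dp; infer_instance

-- ===== CLAIM (what is proved, stated in full; the proofs are below) =====
def Claim_equal_dp : Prop := ∀ (costos : List Int) (prestigios : List Int) (n : Int) (presupuesto : Int) (memo : List (Int × Int × Int × Int)), Dom_dp costos prestigios n presupuesto memo → Pre_dp costos prestigios n presupuesto memo → Spec_dp costos prestigios n presupuesto memo (dp costos prestigios n presupuesto memo)

-- ===== LEMMAS AND PROOFS =====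

-- the mathematical value of state (i, b): the memoized recursion relative to the
-- ORIGINAL memo only (A's in-flight memo writes are consistent with it)
def Gv (costos prestigios : List Int) (memo0 : PySem.Dict (Int × Int) (Int × Int)) (i : Nat) (b : Int) : Int × Int :=
  match memo0.get? ((i : Int), b) with
  | some v => v
  | none =>
    if h : i < costos.length then
      let c := costos.getD i 0
      if c > b then Gv costos prestigios memo0 (i + 1) b
      else
        let r1 := Gv costos prestigios memo0 (i + 1) b
        let r2 := Gv costos prestigios memo0 (i + 1) (b - c)
        let p2 := r2.1 + prestigios.getD i 0
        let c2 := r2.2 + c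
        if p2 > r1.1 then (p2, c2)
        else if p2 < r1.1 then r1
        else (p2, min r1.2 c2)
    else (0, 0)
termination_by costos.length - i
decreasing_by all_goals omega

-- A's in-flight memo invariant: every entry at a key (j, b) with j ≤ len is the Gv
-- value, and the original memo's keys are never lost
def InvA (costos prestigios : List Int) (memo0 m : PySem.Dict (Int × Int) (Int × Int)) : Prop :=
  (∀ k : Int × Int, (memo0.get? k).isSome = true → (m.get? k).isSome = true) ∧
  (∀ (j : Nat) (b : Int) (v : Int × Int), j ≤ costos.length → m.get? ((j : Int), b) = some v → v = Gv costos prestigios memo0 j b)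

theorem invA_self (costos prestigios : List Int) (memo0 : PySem.Dict (Int × Int) (Int × Int)) :
    InvA costos prestigios memo0 memo0 := by
  refine ⟨fun _ h => h, fun j b v _ h => ?_⟩
  rw [Gv, h]

theorem invA_insert (costos prestigios : List Int) (memo0 m : PySem.Dict (Int × Int) (Int × Int))
    (h : InvA costos prestigios memo0 m) (j : Nat) (hj : j ≤ costos.length) (b : Int) :
    InvA costos prestigios memo0 (m.insert ((j : Int), b) (Gv costos prestigios memo0 j b)) := by
  constructor
  · intro k hk
    by_cases hkey : k = ((j : Int), b)
    · subst hkey; rw [PySem.Dict.get?_insert_self]; rfl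
    · rw [PySem.Dict.get?_insert_of_ne _ _ hkey]; exact h.1 k hk
  · intro j' b' v hj' hget
    by_cases hkey : (((j' : Nat) : Int), b') = ((j : Int), b)
    · have hj2 : j' = j := by
        have h1 := congrArg Prod.fst hkey
        simp only at h1
        exact_mod_cast h1
      have hb2 : b' = b := congrArg Prod.snd hkey
      subst hj2; subst hb2
      rw [hkey, PySem.Dict.get?_insert_self] at hget
      exact (Option.some_inj.mp hget).symm
    · rw [PySem.Dict.get?_insert_of_ne _ _ hkey] at hget
      exact h.2 j' b' v hj' hget

theorem dpAuxA_main (costos prestigios : List Int) (memo0 : PySem.Dict (Int × Int) (Int × Int)) :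
    ∀ (f : Nat) (i : Nat) (b : Int) (m : PySem.Dict (Int × Int) (Int × Int)),
      costos.length - i < f → i ≤ costos.length → InvA costos prestigios memo0 m →
      (dpAuxA costos prestigios f (i : Int) b m).1 = Gv costos prestigios memo0 i b ∧
      InvA costos prestigios memo0 (dpAuxA costos prestigios f (i : Int) b m).2 := by
  intro f
  induction f with
  | zero => intro i b m hf; exact absurd hf (Nat.not_lt_zero _)
  | succ f ih =>
    intro i b m hf hi hInv
    have hins : ∀ (v' : Int × Int) (m' : PySem.Dict (Int × Int) (Int × Int)),
        v' = Gv costos prestigios memo0 i b → InvA costos prestigios memo0 m' →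
        v' = Gv costos prestigios memo0 i b ∧
          InvA costos prestigios memo0 (m'.insert ((i : Int), b) v') := by
      intro v' m' h1 h2
      refine ⟨h1, ?_⟩
      rw [h1]
      exact invA_insert costos prestigios memo0 m' h2 i hi b
    simp only [dpAuxA]
    rcases hm : m.get? ((i : Int), b) with _ | v
    · have hm0 : memo0.get? ((i : Int), b) = none := by
        rcases h0 : memo0.get? ((i : Int), b) with _ | w
        · rfl
        · have := hInv.1 ((i : Int), b) (by rw [h0]; rfl)
          rw [hm] at this
          exact absurd this (by simp)
      by_cases hieq : (i : Int) = (costos.length : Int)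
      · simp only [if_pos hieq]
        refine hins _ _ ?_ hInv
        have hieq' : i = costos.length := by exact_mod_cast hieq
        rw [Gv, hm0, dif_neg (by omega)]
      · have hilt : i < costos.length := by
          have : i ≠ costos.length := fun h => hieq (by exact_mod_cast h)
          omega
        have hcget : PySem.List.pyGet? costos (i : Int) = some (costos.getD i 0) := by
          rw [PySem.List.pyGet?_natCast, List.getElem?_eq_getElem hilt]
          rw [List.getD_eq_getElem costos 0 hilt]
        have hcast : (i : Int) + 1 = ((i + 1 : Nat) : Int) := by push_cast; ring
        have hpr : (PySem.List.pyGet? prestigios (i : Int)).getD 0 = prestigios.getD i 0 := by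
          rw [PySem.List.pyGet?_natCast, List.getD_eq_getElem?_getD]
        have hGv : Gv costos prestigios memo0 i b =
            (if costos.getD i 0 > b then Gv costos prestigios memo0 (i + 1) b
             else
               let r1 := Gv costos prestigios memo0 (i + 1) b
               let r2 := Gv costos prestigios memo0 (i + 1) (b - costos.getD i 0)
               let p2 := r2.1 + prestigios.getD i 0
               let c2 := r2.2 + costos.getD i 0
               if p2 > r1.1 then (p2, c2)
               else if p2 < r1.1 then r1
               else (p2, min r1.2 c2)) := by
          rw [Gv, hm0, dif_pos hilt]
        simp only [if_neg hieq, hcget]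
        by_cases hcb : costos.getD i 0 > b
        · rw [if_pos hcb, hcast]
          obtain ⟨h1, h2⟩ := ih (i + 1) b m (by omega) (by omega) hInv
          refine hins _ _ ?_ h2
          rw [h1, hGv, if_pos hcb]
        · rw [if_neg hcb, hcast]
          obtain ⟨h1, h2⟩ := ih (i + 1) b m (by omega) (by omega) hInv
          obtain ⟨h3, h4⟩ :=
            ih (i + 1) (b - costos.getD i 0)
              (dpAuxA costos prestigios f ((i + 1 : Nat) : Int) b m).2 (by omega) (by omega) h2
          simp only [h1, h3, hpr]
          by_cases hgt : (Gv costos prestigios memo0 (i + 1) (b - costos.getD i 0)).1 + prestigios.getD i 0 >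
              (Gv costos prestigios memo0 (i + 1) b).1
          · rw [if_pos hgt]
            refine hins _ _ ?_ h4
            rw [hGv, if_neg hcb]
            simp only [if_pos hgt]
          · rw [if_neg hgt]
            by_cases hlt : (Gv costos prestigios memo0 (i + 1) (b - costos.getD i 0)).1 + prestigios.getD i 0 <
                (Gv costos prestigios memo0 (i + 1) b).1
            · rw [if_pos hlt]
              refine hins _ _ ?_ h4
              rw [hGv, if_neg hcb]
              simp only [if_neg hgt, if_pos hlt]
            · rw [if_neg hlt]
              refine hins _ _ ?_ h4
              rw [hGv, if_neg hcb]
              simp only [if_neg hgt, if_neg hlt]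
    · exact hins v m (hInv.2 i b v hi hm) hInv

-- phase-1 membership: a budget that passes the filter is in the expanded level
theorem mem_expLevelB (memo0 : PySem.Dict (Int × Int) (Int × Int)) (total i b : Int) :
    ∀ (cur : List Int), b ∈ cur → memo0.contains (i, b) = false → i ≠ total →
      b ∈ expLevelB memo0 total i cur := by
  intro cur hb hm hi
  suffices h : ∀ (l : List Int) (acc : List Int), (b ∈ acc ∨ b ∈ l) →
      b ∈ l.foldl (fun exp x =>
        if exp.contains x = false ∧ memo0.contains (i, x) = false ∧ i ≠ total then exp ++ [x] else exp) acc by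
    exact h cur [] (Or.inr hb)
  intro l
  induction l with
  | nil => intro acc h; simp at h; simpa using h
  | cons x xs ih =>
    intro acc h
    simp only [List.foldl_cons]
    by_cases hcond : acc.contains x = false ∧ memo0.contains (i, x) = false ∧ i ≠ total
    · rw [if_pos hcond]
      rcases h with h | h
      · exact ih _ (Or.inl (by simp [h]))
      · rcases List.mem_cons.mp h with rfl | h
        · exact ih _ (Or.inl (by simp))
        · exact ih _ (Or.inr h)
    · rw [if_neg hcond]
      rcases h with h | h
      · exact ih _ (Or.inl h)
      · rcases List.mem_cons.mp h with rfl | h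
        · -- the condition failed: since memo/total parts hold, x must be in acc already
          have hx : acc.contains b = true := by
            by_contra hc
            exact hcond ⟨by simpa using hc, hm, hi⟩
          exact ih _ (Or.inl (by simpa using hx))
        · exact ih _ (Or.inr h)

-- every budget in the expanded level was not answered by memo / base case
theorem expLevelB_sound (memo0 : PySem.Dict (Int × Int) (Int × Int)) (total i : Int) :
    ∀ (cur : List Int) (b : Int), b ∈ expLevelB memo0 total i cur →
      memo0.contains (i, b) = false ∧ i ≠ total := by
  intro cur
  suffices h : ∀ (l : List Int) (acc : List Int),
      (∀ b ∈ acc, memo0.contains (i, b) = false ∧ i ≠ total) →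
      ∀ b ∈ l.foldl (fun exp x =>
        if exp.contains x = false ∧ memo0.contains (i, x) = false ∧ i ≠ total then exp ++ [x] else exp) acc,
        memo0.contains (i, b) = false ∧ i ≠ total by
    exact fun b hb => h cur [] (by simp) b hb
  intro l
  induction l with
  | nil => intro acc hacc b hb; exact hacc b (by simpa using hb)
  | cons x xs ih =>
    intro acc hacc b hb
    simp only [List.foldl_cons] at hb
    by_cases hcond : acc.contains x = false ∧ memo0.contains (i, x) = false ∧ i ≠ total
    · rw [if_pos hcond] at hb
      refine ih _ ?_ b hb
      intro b' hb'
      rcases List.mem_append.mp hb' with h | h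
      · exact hacc b' h
      · simp at h; subst h; exact ⟨hcond.2.1, hcond.2.2⟩
    · rw [if_neg hcond] at hb
      exact ih _ hacc b hb

-- children of an expanded budget are in the next frontier
theorem mem_nxtB (c : Int) :
    ∀ (exp : List Int) (b : Int), b ∈ exp →
      b ∈ exp.foldl (fun acc b => if c ≤ b then acc ++ [b, b - c] else acc ++ [b]) [] ∧
      (c ≤ b → b - c ∈ exp.foldl (fun acc b => if c ≤ b then acc ++ [b, b - c] else acc ++ [b]) []) := by
  suffices h : ∀ (l : List Int) (acc : List Int) (x : Int),
      (x ∈ acc ∨ ∃ b ∈ l, x = b ∨ (c ≤ b ∧ x = b - c)) →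
      x ∈ l.foldl (fun acc b => if c ≤ b then acc ++ [b, b - c] else acc ++ [b]) acc by
    intro exp b hb
    constructor
    · exact h exp [] b (Or.inr ⟨b, hb, Or.inl rfl⟩)
    · intro hc; exact h exp [] (b - c) (Or.inr ⟨b, hb, Or.inr ⟨hc, rfl⟩⟩)
  intro l
  induction l with
  | nil => intro acc x h; simp at h; simpa using h
  | cons y ys ih =>
    intro acc x h
    simp only [List.foldl_cons]
    by_cases hc : c ≤ y
    · rw [if_pos hc]
      rcases h with h | ⟨b', hb', hx⟩
      · exact ih _ _ (Or.inl (by simp [h]))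
      · rcases List.mem_cons.mp hb' with rfl | hb'
        · rcases hx with rfl | ⟨_, rfl⟩
          · exact ih _ _ (Or.inl (by simp))
          · exact ih _ _ (Or.inl (by simp))
        · exact ih _ _ (Or.inr ⟨b', hb', hx⟩)
    · rw [if_neg hc]
      rcases h with h | ⟨b', hb', hx⟩
      · exact ih _ _ (Or.inl (by simp [h]))
      · rcases List.mem_cons.mp hb' with rfl | hb'
        · rcases hx with rfl | ⟨hcb, rfl⟩
          · exact ih _ _ (Or.inl (by simp))
          · exact absurd hcb hc
        · exact ih _ _ (Or.inr ⟨b', hb', hx⟩)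

-- the per-level table maps every expanded budget to its value
theorem levelTabB_get (costos prestigios : List Int) (memo0 : PySem.Dict (Int × Int) (Int × Int))
    (j : Int) (T : PySem.Dict Int (Int × Int)) :
    ∀ (exp : List Int) (b : Int), b ∈ exp →
      (levelTabB costos prestigios memo0 (j, exp) T).get? b = some (pvVal costos prestigios memo0 j T b) := by
  suffices h : ∀ (l : List Int) (d : PySem.Dict Int (Int × Int)) (b : Int),
      (b ∈ l ∨ d.get? b = some (pvVal costos prestigios memo0 j T b)) →
      (l.foldl (fun newtab x => newtab.insert x (pvVal costos prestigios memo0 j T x)) d).get? b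
        = some (pvVal costos prestigios memo0 j T b) by
    intro exp b hb; exact h exp PySem.Dict.empty b (Or.inl hb)
  intro l
  induction l with
  | nil => intro d b h; simp at h; simpa using h
  | cons x xs ih =>
    intro d b h
    simp only [List.foldl_cons]
    by_cases hbx : b = x
    · subst hbx
      by_cases hmem : b ∈ xs
      · exact ih _ _ (Or.inl hmem)
      · exact ih _ _ (Or.inr (PySem.Dict.get?_insert_self _ _ _))
    · rcases h with h | h
      · rcases List.mem_cons.mp h with rfl | h
        · exact absurd rfl hbx
        · exact ih _ _ (Or.inl h)
      · exact ih _ _ (Or.inr (by rw [PySem.Dict.get?_insert_of_ne _ _ hbx]; exact h))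

-- getvalB answers with the Gv value on every consulted budget, given that the
-- level's table is correct on the expanded budgets
theorem getvalB_eq (costos prestigios : List Int) (memo0 : PySem.Dict (Int × Int) (Int × Int))
    (j : Nat) (hj : j ≤ costos.length) (cur : List Int) (T : PySem.Dict Int (Int × Int))
    (H : ∀ b ∈ expLevelB memo0 (costos.length : Int) (j : Int) cur,
          T.get? b = some (Gv costos prestigios memo0 j b)) :
    ∀ b ∈ cur, getvalB memo0 (costos.length : Int) (j : Int) b T = Gv costos prestigios memo0 j b := by
  intro b hb
  rcases hm : memo0.get? ((j : Int), b) with _ | v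
  · by_cases hjl : j = costos.length
    · subst hjl
      unfold getvalB
      rw [hm, if_pos rfl, Gv, hm]
      simp
    · have hjlt : j < costos.length := lt_of_le_of_ne hj hjl
      have hne : (j : Int) ≠ (costos.length : Int) := by exact_mod_cast hjl
      have hcont : memo0.contains ((j : Int), b) = false := by
        rw [← PySem.Dict.get?_eq_none_iff_contains]; exact hm
      have hmem := mem_expLevelB memo0 (costos.length : Int) (j : Int) b cur hb hcont hne
      have hT := H b hmem
      unfold getvalB
      rw [hm, if_neg hne]
      rw [PySem.Dict.getD_eq_get?_getD, hT]; rfl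
  · unfold getvalB
    rw [hm, Gv, hm]

theorem phase1B_main (costos prestigios : List Int) (memo0 : PySem.Dict (Int × Int) (Int × Int)) :
    ∀ (f : Nat) (i : Nat) (cur : List Int), costos.length - i < f → i ≤ costos.length →
      ∀ b ∈ expLevelB memo0 (costos.length : Int) (i : Int) cur,
        ((phase1B costos memo0 f (i : Int) cur).foldr (levelTabB costos prestigios memo0) PySem.Dict.empty).get? b
          = some (Gv costos prestigios memo0 i b) := by
  intro f
  induction f with
  | zero => intro i cur hf; exact absurd hf (Nat.not_lt_zero _)
  | succ f ih =>
    intro i cur hf hi b hb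
    simp only [phase1B]
    have hbexp : b ∈ expLevelB memo0 (costos.length : Int) (i : Int) cur := hb
    have hnotempty : ¬ ((expLevelB memo0 (costos.length : Int) (i : Int) cur).isEmpty = true) := by
      simp only [List.isEmpty_iff]
      exact List.ne_nil_of_mem hbexp
    rw [if_neg hnotempty]
    obtain ⟨hcont, hne⟩ := expLevelB_sound memo0 _ _ cur b hbexp
    have hilt : i < costos.length := by
      rcases lt_or_eq_of_le hi with h | h
      · exact h
      · exact absurd (by exact_mod_cast congrArg (fun x : Nat => (x : Int)) h) hne
    simp only [List.foldr_cons]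
    have hcast : (i : Int) + 1 = ((i + 1 : Nat) : Int) := by push_cast; ring
    rw [levelTabB_get costos prestigios memo0 (i : Int) _ _ b hbexp]
    congr 1
    have hrec := ih (i + 1)
      ((expLevelB memo0 (costos.length : Int) (i : Int) cur).foldl
        (fun acc b => if (PySem.List.pyGet? costos (i : Int)).getD 0 ≤ b then acc ++ [b, b - (PySem.List.pyGet? costos (i : Int)).getD 0] else acc ++ [b]) [])
      (by omega) (by omega)
    have hget := getvalB_eq costos prestigios memo0 (i + 1) (by omega) _ _ hrec
    have hmemo : memo0.get? ((i : Int), b) = none := by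
      rw [PySem.Dict.get?_eq_none_iff_contains]; exact hcont
    have hcval : (PySem.List.pyGet? costos (i : Int)).getD 0 = costos.getD i 0 := by
      rw [PySem.List.pyGet?_natCast, List.getD_eq_getElem?_getD]
    obtain ⟨hmem1, hmem2⟩ := mem_nxtB ((PySem.List.pyGet? costos (i : Int)).getD 0)
      (expLevelB memo0 (costos.length : Int) (i : Int) cur) b hbexp
    unfold pvVal
    rw [hcast]
    rw [Gv]
    rw [hmemo, dif_pos hilt]
    simp only
    by_cases hcb : costos.getD i 0 > b
    · rw [if_pos (by rw [hcval]; exact hcb), if_pos hcb]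
      exact hget b hmem1
    · rw [if_neg (by rw [hcval]; exact hcb), if_neg hcb]
      rw [hget b hmem1, hget (b - (PySem.List.pyGet? costos (i : Int)).getD 0) (hmem2 (by omega)), hcval]
      have hpr : (PySem.List.pyGet? prestigios (i : Int)).getD 0 = prestigios.getD i 0 := by
        rw [PySem.List.pyGet?_natCast, List.getD_eq_getElem?_getD]
      rw [hpr]

-- ===== VERDICT (by name: the statement is the Claim_ definition above) =====
theorem dp_spec : Claim_equal_dp := by
  unfold Claim_equal_dp
  intro costos prestigios n presupuesto memo hDom hPre
  unfold Spec_dp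
  obtain ⟨hn0, hnl, hpl⟩ := hPre
  have hn : n = ((n.toNat : Nat) : Int) := by omega
  have hi0l : n.toNat ≤ costos.length := by omega
  have hfuel : costos.length - n.toNat < ((costos.length : Int) - n).toNat + 1 := by omega
  have hA : dp costos prestigios n presupuesto memo
      = Gv costos prestigios (pvMemoDict memo) n.toNat presupuesto := by
    unfold dp
    rw [hn]
    exact (dpAuxA_main costos prestigios (pvMemoDict memo) _ n.toNat presupuesto (pvMemoDict memo)
      (by omega) hi0l (invA_self costos prestigios (pvMemoDict memo))).1
  have hB : dp_alt costos prestigios n presupuesto memo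
      = Gv costos prestigios (pvMemoDict memo) n.toNat presupuesto := by
    unfold dp_alt
    rw [hn]
    refine getvalB_eq costos prestigios (pvMemoDict memo) n.toNat hi0l [presupuesto] _ ?_ presupuesto (by simp)
    intro b hb
    exact phase1B_main costos prestigios (pvMemoDict memo) (((costos.length : Int) - ((n.toNat : Nat) : Int)).toNat + 1)
      n.toNat [presupuesto] (by omega) hi0l b hb
  rw [hA, hB]
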